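-- pv_equiv track=rewrite | github.com/degenai/Dataset9 | scraper/visualize_pagination.py | analyze_content_bands
-- ===== SOURCE A (Python) =====
-- def analyze_content_bands(pages_data: dict) -> list:
--     """
--     Find contiguous page ranges with new content.
--
--     Returns list of {start, end, total_new, efta_min, efta_max}
--     """
--     pages = sorted(pages_data.keys())
--     bands = []
--
--     band_start = None
--     band_new = 0
--     band_efta_min = None
--     band_efta_max = None
--
--     for page in pages:
--         info = pages_data[page]
--         new_files = info.get("new_files", 0)
--
--         if new_files > 0:
--             if band_start is None:
--                 band_start = page
--                 band_new = new_files
--                 band_efta_min = info.get("min_efta")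
--                 band_efta_max = info.get("max_efta")
--             else:
--                 band_new += new_files
--                 if info.get("min_efta") and (band_efta_min is None or info["min_efta"] < band_efta_min):
--                     band_efta_min = info["min_efta"]
--                 if info.get("max_efta") and (band_efta_max is None or info["max_efta"] > band_efta_max):
--                     band_efta_max = info["max_efta"]
--         else:
--             if band_start is not None:
--                 bands.append({
--                     "start": band_start,
--                     "end": page - 1,
--                     "total_new": band_new,
--                     "efta_min": band_efta_min,
--                     "efta_max": band_efta_max,
--                 })
--                 band_start = None
--                 band_new = 0
--                 band_efta_min = None
--                 band_efta_max = None
--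
--     # Close final band
--     if band_start is not None:
--         bands.append({
--             "start": band_start,
--             "end": pages[-1],
--             "total_new": band_new,
--             "efta_min": band_efta_min,
--             "efta_max": band_efta_max,
--         })
--
--     return bands
-- ===== SOURCE B (Python) =====
-- def analyze_content_bands(pages_data: dict) -> list:
--     """
--     Find contiguous page ranges with new content.
--
--     Returns list of {start, end, total_new, efta_min, efta_max}
--     """
--     pages = sorted(pages_data.keys())
--
--     # Phase 1: maximal runs of consecutive (in sorted order) pages with new
--     # content, each paired with the band's "end" value.
--     segments = []
--     run = []
--     for page in pages:
--         if pages_data[page].get("new_files", 0) > 0: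
--             run.append(page)
--         else:
--             if run:
--                 segments.append((run, page - 1))
--             run = []
--     if run:
--         segments.append((run, pages[-1]))
--
--     # Phase 2: aggregate each segment into its band dict.
--     bands = []
--     for seg, end in segments:
--         first, rest = seg[0], seg[1:]
--         info0 = pages_data[first]
--         total = info0.get("new_files", 0)
--         emin = info0.get("min_efta")
--         emax = info0.get("max_efta")
--         for p in rest:
--             info = pages_data[p]
--             total += info.get("new_files", 0)
--             v = info.get("min_efta")
--             if v and (emin is None or v < emin):
--                 emin = v
--             v = info.get("max_efta")
--             if v and (emax is None or v > emax):
--                 emax = v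
--         bands.append({"start": first, "end": end, "total_new": total,
--                       "efta_min": emin, "efta_max": emax})
--     return bands
-- ===== Notes on version B (the rewrite author's own statement) =====
-- stated objective: alternative
-- what changed: Replaces A's single stateful sweep carrying five mutable band variables by a two-phase decomposition: one pass partitions the sorted pages into maximal runs of pages with new content (each paired with its end value), then each run is independently aggregated into its band dict.
import Mathlib
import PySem

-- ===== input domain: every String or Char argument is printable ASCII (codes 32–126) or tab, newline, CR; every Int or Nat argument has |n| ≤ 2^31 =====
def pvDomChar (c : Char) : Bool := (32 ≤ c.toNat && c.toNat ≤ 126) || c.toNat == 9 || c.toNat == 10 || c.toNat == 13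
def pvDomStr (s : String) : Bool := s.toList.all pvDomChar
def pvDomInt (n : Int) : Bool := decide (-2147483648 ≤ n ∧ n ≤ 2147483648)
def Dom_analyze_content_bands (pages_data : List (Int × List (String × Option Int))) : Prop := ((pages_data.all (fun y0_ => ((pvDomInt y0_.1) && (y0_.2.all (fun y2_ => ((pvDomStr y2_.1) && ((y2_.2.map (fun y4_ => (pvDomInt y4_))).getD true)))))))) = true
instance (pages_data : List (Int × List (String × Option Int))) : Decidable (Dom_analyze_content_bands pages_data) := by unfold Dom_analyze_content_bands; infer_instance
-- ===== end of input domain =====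

-- B replaces A's single stateful five-variable sweep by a two-phase decomposition
-- (partition sorted pages into runs, then aggregate each run); alternative, not faster.

-- shared accessor helpers: these transliterate the dict-access expressions that appear
-- verbatim in BOTH Pythons (pages_data[page], info.get("new_files", 0), info.get("min_efta"),
-- info.get("max_efta"), and the two truthiness-guarded min/max updates)
def pvInfo (pd : PySem.Dict Int (List (String × Option Int))) (page : Int) : List (String × Option Int) :=
  PySem.Dict.getD pd page []

def pvNF (info : List (String × Option Int)) : Int :=
  -- info.get("new_files", 0); Pre_ excludes the value None (where Python's `> 0` raises)
  (PySem.Dict.getD (PySem.Dict.ofList info) "new_files" (some 0)).getD 0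

def pvMinE (info : List (String × Option Int)) : Option Int :=
  PySem.Dict.getD (PySem.Dict.ofList info) "min_efta" none

def pvMaxE (info : List (String × Option Int)) : Option Int :=
  PySem.Dict.getD (PySem.Dict.ofList info) "max_efta" none

-- if info.get("min_efta") and (mn is None or info["min_efta"] < mn): mn = info["min_efta"]
def pvUpdMin (info : List (String × Option Int)) (mn : Option Int) : Option Int :=
  let v := pvMinE info
  if (v ≠ none ∧ v.getD 0 ≠ 0) ∧ (mn = none ∨ v.getD 0 < mn.getD 0) then v else mn

def pvUpdMax (info : List (String × Option Int)) (mx : Option Int) : Option Int :=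
  let v := pvMaxE info
  if (v ≠ none ∧ v.getD 0 ≠ 0) ∧ (mx = none ∨ mx.getD 0 < v.getD 0) then v else mx

def pvBand (s e n : Int) (mn mx : Option Int) : List (String × Option Int) :=
  [("start", some s), ("end", some e), ("total_new", some n), ("efta_min", mn), ("efta_max", mx)]

-- ===== PORT A =====
def analyze_content_bands (pages_data : List (Int × List (String × Option Int))) : List (List (String × Option Int)) :=
  let pd := PySem.Dict.ofList pages_data
  let pages := PySem.List.sorted (PySem.Dict.keys pd) (fun x => x) false
  let st := pages.foldl
    (fun (st : List (List (String × Option Int)) × Option Int × Int × Option Int × Option Int) page =>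
      let (bands, band_start, band_new, band_efta_min, band_efta_max) := st
      let info := pvInfo pd page
      let new_files := pvNF info
      if 0 < new_files then
        match band_start with
        | none => (bands, some page, new_files, pvMinE info, pvMaxE info)
        | some _ =>
          (bands, band_start, band_new + new_files,
           pvUpdMin info band_efta_min, pvUpdMax info band_efta_max)
      else
        match band_start with
        | some s =>
          (bands ++ [pvBand s (page - 1) band_new band_efta_min band_efta_max],
           none, 0, none, none)
        | none => (bands, none, band_new, band_efta_min, band_efta_max))
    ([], none, 0, none, none)
  match st with
  | (bands, some s, band_new, band_efta_min, band_efta_max) =>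
    bands ++ [pvBand s ((PySem.List.pyGet? pages (-1)).getD 0) band_new band_efta_min band_efta_max]
  | (bands, none, _, _, _) => bands

-- ===== PORT B =====
-- phase 2: fold over the tail of a run, seeded from its first page
def pvAggregate (pd : PySem.Dict Int (List (String × Option Int))) (first : Int) (rest : List Int) :
    Int × Option Int × Option Int :=
  let info0 := pvInfo pd first
  rest.foldl
    (fun (acc : Int × Option Int × Option Int) p =>
      let info := pvInfo pd p
      (acc.1 + pvNF info, pvUpdMin info acc.2.1, pvUpdMax info acc.2.2))
    (pvNF info0, pvMinE info0, pvMaxE info0)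

-- phase 1: maximal runs of pages with new_files > 0, each with its end value
def pvSegments (pd : PySem.Dict Int (List (String × Option Int))) (pages : List Int) :
    List (List Int × Int) :=
  let st := pages.foldl
    (fun (st : List (List Int × Int) × List Int) page =>
      if 0 < pvNF (pvInfo pd page) then (st.1, st.2 ++ [page])
      else if st.2 ≠ [] then (st.1 ++ [(st.2, page - 1)], []) else (st.1, []))
    ([], [])
  if st.2 ≠ [] then st.1 ++ [(st.2, (PySem.List.pyGet? pages (-1)).getD 0)] else st.1

def analyze_content_bands_alt (pages_data : List (Int × List (String × Option Int))) : List (List (String × Option Int)) :=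
  let pd := PySem.Dict.ofList pages_data
  let pages := PySem.List.sorted (PySem.Dict.keys pd) (fun x => x) false
  (pvSegments pd pages).map (fun seg =>
    match seg.1 with
    | [] => []  -- unreachable: phase 1 only emits nonempty runs
    | first :: rest =>
      let a := pvAggregate pd first rest
      pvBand first seg.2 a.1 a.2.1 a.2.2)

-- ===== PRECONDITION & SPEC =====
-- Pre_ excludes exactly the inputs where some page's dict maps "new_files" to None:
-- there Python A raises TypeError (None > 0), and B raises identically.
def Pre_analyze_content_bands (pages_data : List (Int × List (String × Option Int))) : Prop :=
  ∀ info ∈ PySem.Dict.values (PySem.Dict.ofList pages_data),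
    PySem.Dict.getD (PySem.Dict.ofList info) "new_files" (some 0) ≠ none
instance (pages_data : List (Int × List (String × Option Int))) : Decidable (Pre_analyze_content_bands pages_data) := by unfold Pre_analyze_content_bands; infer_instance

def pvWitness_analyze_content_bands : (List (Int × List (String × Option Int))) :=
  [(1, [("new_files", some 2), ("min_efta", some 3), ("max_efta", some 7)]),
   (2, [("new_files", some 0)]),
   (5, [("new_files", some 1)])]

def Spec_analyze_content_bands (pages_data : List (Int × List (String × Option Int))) (out : List (List (String × Option Int))) : Prop := out = analyze_content_bands_alt pages_data
instance (pages_data : List (Int × List (String × Option Int))) (out : List (List (String × Option Int))) : Decidable (Spec_analyze_content_bands pages_data out) := by unfold Spec_analyze_content_bands; infer_instance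

-- ===== CLAIM (what is proved, stated in full; the proofs are below) =====
def Claim_equal_analyze_content_bands : Prop := ∀ (pages_data : List (Int × List (String × Option Int))), Dom_analyze_content_bands pages_data → Pre_analyze_content_bands pages_data → Spec_analyze_content_bands pages_data (analyze_content_bands pages_data)

-- ===== LEMMAS AND PROOFS =====

-- the two fold step functions, named for the proofs (definitionally the lambdas in the ports)
def pvStepA (pd : PySem.Dict Int (List (String × Option Int)))
    (st : List (List (String × Option Int)) × Option Int × Int × Option Int × Option Int)
    (page : Int) : List (List (String × Option Int)) × Option Int × Int × Option Int × Option Int :=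
  let (bands, band_start, band_new, band_efta_min, band_efta_max) := st
  let info := pvInfo pd page
  let new_files := pvNF info
  if 0 < new_files then
    match band_start with
    | none => (bands, some page, new_files, pvMinE info, pvMaxE info)
    | some _ =>
      (bands, band_start, band_new + new_files,
       pvUpdMin info band_efta_min, pvUpdMax info band_efta_max)
  else
    match band_start with
    | some s =>
      (bands ++ [pvBand s (page - 1) band_new band_efta_min band_efta_max],
       none, 0, none, none)
    | none => (bands, none, band_new, band_efta_min, band_efta_max)

def pvStepB (pd : PySem.Dict Int (List (String × Option Int)))
    (st : List (List Int × Int) × List Int) (page : Int) : List (List Int × Int) × List Int :=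
  if 0 < pvNF (pvInfo pd page) then (st.1, st.2 ++ [page])
  else if st.2 ≠ [] then (st.1 ++ [(st.2, page - 1)], []) else (st.1, [])

-- A's open-band state as a function of B's current run
def pvStOf (pd : PySem.Dict Int (List (String × Option Int))) (cur : List Int) :
    Option Int × Int × Option Int × Option Int :=
  match cur with
  | [] => (none, 0, none, none)
  | f :: r => (some f, pvAggregate pd f r)

-- a segment's band dict
def pvBandOf (pd : PySem.Dict Int (List (String × Option Int))) (seg : List Int × Int) :
    List (String × Option Int) :=
  match seg.1 with
  | [] => []
  | first :: rest =>
    let a := pvAggregate pd first rest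
    pvBand first seg.2 a.1 a.2.1 a.2.2

lemma pvAggregate_snoc (pd : PySem.Dict Int (List (String × Option Int))) (f : Int)
    (r : List Int) (p : Int) :
    pvAggregate pd f (r ++ [p]) =
      ((pvAggregate pd f r).1 + pvNF (pvInfo pd p),
       pvUpdMin (pvInfo pd p) (pvAggregate pd f r).2.1,
       pvUpdMax (pvInfo pd p) (pvAggregate pd f r).2.2) := by
  simp [pvAggregate, List.foldl_append]

lemma pv_fold_rel (pd : PySem.Dict Int (List (String × Option Int))) (l : List Int) :
    ∀ (segs : List (List Int × Int)) (cur : List Int),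
    l.foldl (pvStepA pd) (segs.map (pvBandOf pd), pvStOf pd cur)
      = ((l.foldl (pvStepB pd) (segs, cur)).1.map (pvBandOf pd),
         pvStOf pd (l.foldl (pvStepB pd) (segs, cur)).2) := by
  induction l with
  | nil => intro segs cur; rfl
  | cons page t ih =>
    intro segs cur
    simp only [List.foldl_cons]
    by_cases hnf : 0 < pvNF (pvInfo pd page)
    · cases cur with
      | nil =>
        have e1 : pvStepA pd (segs.map (pvBandOf pd), pvStOf pd []) page
            = (segs.map (pvBandOf pd), pvStOf pd [page]) := by
          simp [pvStepA, pvStOf, pvAggregate, if_pos hnf]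
        have e2 : pvStepB pd (segs, []) page = (segs, [page]) := by
          simp [pvStepB, if_pos hnf]
        rw [e1, e2, ih segs [page]]
      | cons f r =>
        have e1 : pvStepA pd (segs.map (pvBandOf pd), pvStOf pd (f :: r)) page
            = (segs.map (pvBandOf pd), pvStOf pd (f :: (r ++ [page]))) := by
          simp [pvStepA, pvStOf, if_pos hnf, pvAggregate_snoc]
        have e2 : pvStepB pd (segs, f :: r) page = (segs, f :: (r ++ [page])) := by
          simp [pvStepB, if_pos hnf]
        rw [e1, e2, ih segs (f :: (r ++ [page]))]
    · cases cur with
      | nil =>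
        have e1 : pvStepA pd (segs.map (pvBandOf pd), pvStOf pd []) page
            = (segs.map (pvBandOf pd), pvStOf pd []) := by
          simp [pvStepA, pvStOf, if_neg hnf]
        have e2 : pvStepB pd (segs, []) page = (segs, []) := by
          simp [pvStepB, if_neg hnf]
        rw [e1, e2, ih segs []]
      | cons f r =>
        have e1 : pvStepA pd (segs.map (pvBandOf pd), pvStOf pd (f :: r)) page
            = ((segs ++ [(f :: r, page - 1)]).map (pvBandOf pd), pvStOf pd []) := by
          simp [pvStepA, pvStOf, pvBandOf, if_neg hnf]
        have e2 : pvStepB pd (segs, f :: r) page = (segs ++ [(f :: r, page - 1)], []) := by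
          simp [pvStepB, if_neg hnf]
        rw [e1, e2, ih (segs ++ [(f :: r, page - 1)]) []]

lemma pv_main (pd : PySem.Dict Int (List (String × Option Int))) (pages : List Int) :
    (match pages.foldl (pvStepA pd) ([], none, 0, none, none) with
     | (bands, some s, band_new, band_efta_min, band_efta_max) =>
       bands ++ [pvBand s ((PySem.List.pyGet? pages (-1)).getD 0) band_new band_efta_min band_efta_max]
     | (bands, none, _, _, _) => bands)
    = ((if (pages.foldl (pvStepB pd) ([], [])).2 ≠ [] then
          (pages.foldl (pvStepB pd) ([], [])).1
            ++ [((pages.foldl (pvStepB pd) ([], [])).2, (PySem.List.pyGet? pages (-1)).getD 0)]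
        else (pages.foldl (pvStepB pd) ([], [])).1).map (pvBandOf pd)) := by
  have h : pages.foldl (pvStepA pd) ([], none, 0, none, none)
      = ((pages.foldl (pvStepB pd) ([], [])).1.map (pvBandOf pd),
         pvStOf pd (pages.foldl (pvStepB pd) ([], [])).2) := pv_fold_rel pd pages [] []
  rw [h]
  cases hc : (pages.foldl (pvStepB pd) ([], [])).2 with
  | nil => simp [pvStOf]
  | cons f r => simp [pvStOf, pvBandOf]

-- ===== VERDICT (by name: the statement is the Claim_ definition above) =====
theorem analyze_content_bands_spec : Claim_equal_analyze_content_bands := by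
  intro pages_data _ _
  unfold Spec_analyze_content_bands
  exact pv_main (PySem.Dict.ofList pages_data)
    (PySem.List.sorted (PySem.Dict.keys (PySem.Dict.ofList pages_data)) (fun x => x) false)
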